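-- pv_equiv track=rewrite | github.com/libretro/RetroArch | intl/json2h.py | c89_cut
-- ===== SOURCE A (Python) =====
-- def c89_cut(old_str):
--     if old_str.endswith('[...]'):
--         return old_str
--     new_str = ''
--     byte_count = 0
--     for c in old_str:
--         byte_count += len(c.encode('utf-8'))
--         if byte_count > 500:
--             return new_str + '[...]'
--         new_str += c
--     return new_str
-- ===== SOURCE B (Python) =====
-- def c89_cut(old_str):
--     if old_str.endswith('[...]'):
--         return old_str
--     data = old_str.encode('utf-8')
--     if len(data) <= 500:
--         return old_str
--     return data[:500].decode('utf-8', errors='ignore') + '[...]'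
-- ===== Notes on version B (the rewrite author's own statement) =====
-- stated objective: simpler
-- what changed: Replaces the per-character byte-counting accumulation loop with a single UTF-8 encode, a 500-byte slice and a lenient decode that drops any truncated trailing multibyte sequence.
import Mathlib
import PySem

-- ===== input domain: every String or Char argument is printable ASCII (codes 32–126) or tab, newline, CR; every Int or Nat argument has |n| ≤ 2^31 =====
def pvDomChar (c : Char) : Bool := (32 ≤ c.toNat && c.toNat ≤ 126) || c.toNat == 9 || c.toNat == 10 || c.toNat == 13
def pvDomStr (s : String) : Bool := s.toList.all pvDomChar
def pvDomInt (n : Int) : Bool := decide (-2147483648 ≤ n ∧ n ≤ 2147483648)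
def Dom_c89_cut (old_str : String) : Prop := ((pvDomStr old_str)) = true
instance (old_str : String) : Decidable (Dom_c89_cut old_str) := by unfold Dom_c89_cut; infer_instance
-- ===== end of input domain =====

-- B replaces A's per-character byte-counting loop by encode / slice 500 bytes / decode(errors='ignore'); objective: simpler.

-- ===== PORT A =====
-- A's loop: byte_count accumulates utf-8 sizes, returns new + '[...]' as soon as it exceeds 500
def c89Loop (cs : List Char) (new : List Char) (bc : Int) : List Char :=
  match cs with
  | [] => new
  | c :: t =>
    let bc' := bc + (c.utf8Size : Int)
    if bc' > 500 then new ++ "[...]".toList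
    else c89Loop t (new ++ [c]) bc'

def c89_cut (old_str : String) : String :=
  if PySem.Str.endswith old_str "[...]" then old_str
  else String.ofList (c89Loop old_str.toList [] 0)

-- ===== PORT B =====
-- exact rendering of data[:500].decode('utf-8', errors='ignore') on a valid encoding:
-- the longest char-prefix whose cumulative utf-8 byte length fits in the budget
def c89TakeBytes (cs : List Char) (budget : Nat) : List Char :=
  match cs with
  | [] => []
  | c :: t => if c.utf8Size ≤ budget then c :: c89TakeBytes t (budget - c.utf8Size) else []

def c89_cut_alt (old_str : String) : String :=
  if PySem.Str.endswith old_str "[...]" then old_str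
  else if (old_str.toList.map Char.utf8Size).sum ≤ 500 then old_str
  else String.ofList (c89TakeBytes old_str.toList 500 ++ "[...]".toList)

-- ===== PRECONDITION & SPEC =====
def Spec_c89_cut (old_str : String) (out : String) : Prop := out = c89_cut_alt old_str
instance (old_str : String) (out : String) : Decidable (Spec_c89_cut old_str out) := by unfold Spec_c89_cut; infer_instance

-- ===== CLAIM (what is proved, stated in full; the proofs are below) =====
def Claim_equal_c89_cut : Prop := ∀ (old_str : String), Dom_c89_cut old_str → Spec_c89_cut old_str (c89_cut old_str)

-- ===== LEMMAS AND PROOFS =====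

lemma c89Loop_eq (cs : List Char) (acc : List Char) (bc : Nat) (hbc : bc ≤ 500) :
    c89Loop cs acc (bc : Int) =
      if (cs.map Char.utf8Size).sum + bc ≤ 500 then acc ++ cs
      else acc ++ c89TakeBytes cs (500 - bc) ++ "[...]".toList := by
  induction cs generalizing acc bc with
  | nil => simp [c89Loop, hbc]
  | cons c t ih =>
    simp only [c89Loop, List.map_cons, List.sum_cons]
    by_cases h : c.utf8Size ≤ 500 - bc
    · have hgt : ¬ ((bc : Int) + (c.utf8Size : Int) > 500) := by
        omega
      rw [if_neg hgt]
      have : (bc : Int) + (c.utf8Size : Int) = ((bc + c.utf8Size : Nat) : Int) := by omega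
      rw [this, ih (acc ++ [c]) (bc + c.utf8Size) (by omega)]
      rw [c89TakeBytes, if_pos h]
      have hb : 500 - (bc + c.utf8Size) = 500 - bc - c.utf8Size := by omega
      by_cases h2 : (t.map Char.utf8Size).sum + (bc + c.utf8Size) ≤ 500
      · rw [if_pos h2, if_pos (by omega)]; simp
      · rw [if_neg h2, if_neg (by omega)]; simp [hb]
    · have hgt : (bc : Int) + (c.utf8Size : Int) > 500 := by omega
      rw [if_pos hgt, c89TakeBytes, if_neg h, if_neg (by have := Char.utf8Size_pos c; omega)]
      simp

-- ===== VERDICT (by name: the statement is the Claim_ definition above) =====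
theorem c89_cut_spec : Claim_equal_c89_cut := by
  intro s _
  unfold Spec_c89_cut c89_cut c89_cut_alt
  by_cases he : PySem.Str.endswith s "[...]" = true
  · rw [if_pos he, if_pos he]
  · rw [if_neg he, if_neg he,
      show (0 : Int) = ((0 : Nat) : Int) from rfl, c89Loop_eq s.toList [] 0 (by omega)]
    by_cases h : (s.toList.map Char.utf8Size).sum ≤ 500
    · rw [if_pos h]; simp [h, String.ofList_toList]
    · rw [if_neg h]; simp [h]
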